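-- pv_equiv track=rewrite | github.com/daniel-reich/ubiquitous-fiesta | dKeLAqAxpddbkvNhh_18.py | group_seats
-- ===== SOURCE A (Python) =====
-- def group_seats(lst, n):
--     l = []
--     for row in lst:
--         r = []
--         empty = 0
--         for seat in row:
--             if seat == 0:
--                 empty += 1
--             else:
--                 empty = 0
--             r.append(empty)
--         l.append(r)
--     return sum([seat // n for row in l for seat in row ])
-- ===== SOURCE B (Python) =====
-- def group_seats(lst, n):
--     # Scan each row once, tracking the length of the current run of empty
--     # seats; when a run closes, add its groups-count contribution directly.
--     def run_sum(run):
--         return sum(k // n for k in range(1, run + 1))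
--
--     total = 0
--     for row in lst:
--         run = 0
--         for seat in row:
--             if seat == 0:
--                 run += 1
--             else:
--                 total += run_sum(run)
--                 run = 0
--         total += run_sum(run)
--     return total
-- ===== Notes on version B (the rewrite author's own statement) =====
-- stated objective: simpler
-- what changed: B drops A's intermediate nested list of running empty-counts and the final flatten-and-sum comprehension: it scans each row once tracking the current zero-run and, when a run of length L closes, adds sum(k // n for k in 1..L) straight to a running total; Pre_ excludes only the inputs (n == 0 with a non-empty row) on which A raises ZeroDivisionError.
import Mathlib
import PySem

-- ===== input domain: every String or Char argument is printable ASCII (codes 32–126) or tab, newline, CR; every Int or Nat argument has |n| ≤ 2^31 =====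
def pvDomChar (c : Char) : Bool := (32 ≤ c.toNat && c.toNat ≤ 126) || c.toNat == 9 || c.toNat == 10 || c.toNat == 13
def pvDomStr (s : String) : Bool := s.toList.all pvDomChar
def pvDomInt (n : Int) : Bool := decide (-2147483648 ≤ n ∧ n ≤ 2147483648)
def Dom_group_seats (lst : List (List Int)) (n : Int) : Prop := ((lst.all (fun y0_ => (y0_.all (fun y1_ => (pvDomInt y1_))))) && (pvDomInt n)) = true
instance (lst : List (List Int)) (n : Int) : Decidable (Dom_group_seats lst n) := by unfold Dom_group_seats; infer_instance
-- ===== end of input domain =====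

-- B replaces A's nested list of running empty-counts plus a flatten-and-sum comprehension by a
-- single O(1)-space pass that adds each zero-run's contribution when the run closes (simpler).


-- ===== PORT A =====
def group_seats (lst : List (List Int)) (n : Int) : Int :=
  let l := lst.foldl (fun (l : List (List Int)) row =>
    let st := row.foldl (fun (st : List Int × Int) seat =>
        let empty := if seat = 0 then st.2 + 1 else (0 : Int)
        (st.1 ++ [empty], empty)) ([], 0)
    l ++ [st.1]) []
  (l.flatMap (fun row => row.map (fun seat => PySem.Int.floordiv seat n))).foldl (· + ·) 0

-- ===== PORT B =====
-- Source B's helper run_sum(run): sum(k // n for k in range(1, run + 1))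
def runSum (run n : Int) : Int :=
  (PySem.List.pyRange 1 (run + 1) 1).foldl (fun s k => s + PySem.Int.floordiv k n) 0

def group_seats_alt (lst : List (List Int)) (n : Int) : Int :=
  lst.foldl (fun total row =>
    let st := row.foldl (fun (st : Int × Int) seat =>
        if seat = 0 then (st.1, st.2 + 1)
        else (st.1 + runSum st.2 n, 0)) (total, 0)
    st.1 + runSum st.2 n) 0

-- ===== PRECONDITION & SPEC =====
-- Pre_ excludes exactly the inputs on which A raises ZeroDivisionError: n = 0 with some non-empty row.
def Pre_group_seats (lst : List (List Int)) (n : Int) : Prop :=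
  n ≠ 0 ∨ ∀ row ∈ lst, row = []
instance (lst : List (List Int)) (n : Int) : Decidable (Pre_group_seats lst n) := by
  unfold Pre_group_seats; infer_instance

def pvWitness_group_seats : List (List Int) × Int := ([[0, 0, 1, 0], [0]], 2)

def Spec_group_seats (lst : List (List Int)) (n : Int) (out : Int) : Prop := out = group_seats_alt lst n
instance (lst : List (List Int)) (n : Int) (out : Int) : Decidable (Spec_group_seats lst n out) := by unfold Spec_group_seats; infer_instance

-- ===== CLAIM (what is proved, stated in full; the proofs are below) =====
def Claim_equal_group_seats : Prop := ∀ (lst : List (List Int)) (n : Int), Dom_group_seats lst n → Pre_group_seats lst n → Spec_group_seats lst n (group_seats lst n)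

-- ===== LEMMAS AND PROOFS =====

theorem runSum_zero (n : Int) : runSum 0 n = 0 := by
  rw [runSum, PySem.List.pyRange_one_eq_nil (by norm_num)]
  rfl

theorem runSum_step (e n : Int) (he : 0 ≤ e) :
    runSum (e + 1) n = runSum e n + PySem.Int.floordiv (e + 1) n := by
  unfold runSum
  rw [PySem.List.pyRange_one_succ_right (by omega), List.foldl_append]
  rfl

-- A's running-count list for one row, starting from run value e
def arow (row : List Int) (e : Int) : List Int :=
  match row with
  | [] => []
  | s :: row => (if s = 0 then e + 1 else 0) :: arow row (if s = 0 then e + 1 else 0)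

def sumI : List Int → Int
  | [] => 0
  | x :: l => x + sumI l

theorem foldl_add_eq (a : Int) (l : List Int) : l.foldl (· + ·) a = a + sumI l := by
  induction l generalizing a with
  | nil => simp [sumI]
  | cons x l ih => simp [List.foldl_cons, ih, sumI]; ring

theorem sumI_append (l1 l2 : List Int) : sumI (l1 ++ l2) = sumI l1 + sumI l2 := by
  induction l1 with
  | nil => simp [sumI]
  | cons x l ih => simp [sumI, ih]; ring

theorem arow_inner (row : List Int) (acc : List Int) (e : Int) :
    (row.foldl (fun (st : List Int × Int) seat =>
        let empty := if seat = 0 then st.2 + 1 else (0 : Int)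
        (st.1 ++ [empty], empty)) (acc, e)).1 = acc ++ arow row e := by
  induction row generalizing acc e with
  | nil => simp [arow]
  | cons s row ih => simp only [List.foldl_cons, arow, ih, List.append_assoc, List.cons_append,
      List.nil_append]

-- B's per-row fold step (the inner foldl of group_seats_alt)
def bstep (n : Int) (st : Int × Int) (seat : Int) : Int × Int :=
  if seat = 0 then (st.1, st.2 + 1) else (st.1 + runSum st.2 n, 0)

theorem row_lemma (n : Int) (row : List Int) (e tot : Int) (he : 0 ≤ e) :
    (row.foldl (bstep n) (tot, e)).1 + runSum (row.foldl (bstep n) (tot, e)).2 n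
      = tot + runSum e n + sumI ((arow row e).map (fun s => PySem.Int.floordiv s n)) := by
  induction row generalizing e tot with
  | nil => simp [arow, sumI]
  | cons s row ih =>
    by_cases hs : s = 0
    · rw [show (s :: row).foldl (bstep n) (tot, e) = row.foldl (bstep n) (tot, e + 1) by
        simp [List.foldl_cons, bstep, hs]]
      rw [ih (e + 1) tot (by omega)]
      simp only [arow, hs, if_pos, List.map_cons, sumI]
      rw [runSum_step e n he]
      ring
    · rw [show (s :: row).foldl (bstep n) (tot, e) = row.foldl (bstep n) (tot + runSum e n, 0) by
        simp [List.foldl_cons, bstep, hs]]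
      rw [ih 0 (tot + runSum e n) le_rfl]
      simp only [arow, hs, List.map_cons, sumI, ite_false]
      rw [runSum_zero]
      have h0 : PySem.Int.floordiv 0 n = 0 := by
        simp [PySem.Int.floordiv]
      rw [h0]
      ring

-- the per-row list A builds
def rowA (row : List Int) : List Int := arow row 0

theorem outer_eq (lst : List (List Int)) (acc : List (List Int)) :
    lst.foldl (fun (l : List (List Int)) row =>
      let st := row.foldl (fun (st : List Int × Int) seat =>
        let empty := if seat = 0 then st.2 + 1 else (0 : Int)
        (st.1 ++ [empty], empty)) ([], 0)
      l ++ [st.1]) acc = acc ++ lst.map rowA := by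
  induction lst generalizing acc with
  | nil => simp
  | cons r lst ih =>
    simp only [List.foldl_cons, List.map_cons]
    rw [ih, arow_inner r [] 0]
    simp [rowA]

theorem group_seats_eq (lst : List (List Int)) (n : Int) :
    group_seats lst n = sumI ((lst.map rowA).flatMap (fun row => row.map (fun s => PySem.Int.floordiv s n))) := by
  unfold group_seats
  rw [outer_eq lst [], foldl_add_eq]
  simp

theorem alt_eq (lst : List (List Int)) (n : Int) (tot : Int) :
    lst.foldl (fun total row =>
      let st := row.foldl (bstep n) (total, 0)
      st.1 + runSum st.2 n) tot
    = tot + sumI ((lst.map rowA).flatMap (fun row => row.map (fun s => PySem.Int.floordiv s n))) := by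
  induction lst generalizing tot with
  | nil => simp [sumI]
  | cons r lst ih =>
    simp only [List.foldl_cons, List.map_cons, List.flatMap_cons, sumI_append]
    rw [ih]
    have hr := row_lemma n r 0 tot le_rfl
    rw [runSum_zero] at hr
    simp only [add_zero] at hr
    rw [hr]
    simp [rowA]
    ring

-- ===== VERDICT (by name: the statement is the Claim_ definition above) =====
theorem group_seats_spec : Claim_equal_group_seats := by
  intro lst n _ _
  unfold Spec_group_seats
  have halt : group_seats_alt lst n = lst.foldl (fun total row =>
      let st := row.foldl (bstep n) (total, 0)
      st.1 + runSum st.2 n) 0 := rfl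
  rw [group_seats_eq lst n, halt, alt_eq lst n 0]
  ring
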